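-- pv_equiv track=rewrite | github.com/zdamien/PythonExer | parens.py | yieldgen
-- ===== SOURCE A (Python) =====
-- def yieldgen(n):
--     """
-- >>> list(recgen(3))
-- ['()()()', '(()())', '()(())', '((()))', '(())()']
-- """
--     if n<=1:
--         yield '()'
--         return  #needed to escape infinite loop
--     for par in yieldgen(n-1):
--         p1='()'+par
--         p2='('+par+')'
--         p3=par+'()'
--         yield p1
--         yield p2
--         if p1 != p3:
--             yield p3
-- ===== SOURCE B (Python) =====
-- def yieldgen(n):
--     seq = ['()']
--     m = n
--     while m > 1:
--         nxt = []
--         for par in seq: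
--             p1 = '()' + par
--             p2 = '(' + par + ')'
--             p3 = par + '()'
--             nxt.append(p1)
--             nxt.append(p2)
--             if p1 != p3:
--                 nxt.append(p3)
--         seq = nxt
--         m -= 1
--     yield from seq
-- ===== Notes on version B (the rewrite author's own statement) =====
-- stated objective: alternative
-- what changed: Replaces the top-down recursive generator (recurse to n-1, then expand each element lazily) by an iterative bottom-up builder: start from ['()'] and apply the expansion step n-1 times in a decrementing while-loop, building each next level as an explicit list.
import Mathlib
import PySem

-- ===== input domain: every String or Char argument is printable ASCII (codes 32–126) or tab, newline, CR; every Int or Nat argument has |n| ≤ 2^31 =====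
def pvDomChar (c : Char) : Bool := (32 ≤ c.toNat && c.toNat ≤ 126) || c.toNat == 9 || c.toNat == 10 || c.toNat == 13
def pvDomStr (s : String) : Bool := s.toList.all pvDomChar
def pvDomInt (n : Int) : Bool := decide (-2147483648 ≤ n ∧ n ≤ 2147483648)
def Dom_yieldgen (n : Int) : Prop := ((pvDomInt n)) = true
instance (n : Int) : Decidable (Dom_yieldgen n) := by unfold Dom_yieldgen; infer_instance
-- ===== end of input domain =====

-- B replaces the top-down recursive generator by an iterative bottom-up builder (same cost, different decomposition).


-- ===== PORT A =====
-- A: recursive generator; the for-loop yielding p1, p2, (p3 if p1≠p3) is a flatMap over the recursive call.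
def yieldgen (n : Int) : List String :=
  if n ≤ 1 then ["()"]
  else
    (yieldgen (n - 1)).flatMap (fun par =>
      let p1 := "()" ++ par
      let p2 := "(" ++ par ++ ")"
      let p3 := par ++ "()"
      [p1, p2] ++ if p1 ≠ p3 then [p3] else [])
termination_by n.toNat
decreasing_by omega

-- ===== PORT B =====
-- inner for-loop of B: build nxt by appending
def altStep (seq : List String) : List String :=
  seq.foldl (fun nxt par =>
    let p1 := "()" ++ par
    let p2 := "(" ++ par ++ ")"
    let p3 := par ++ "()"
    (nxt ++ [p1] ++ [p2]) ++ if p1 ≠ p3 then [p3] else []) []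

-- the 'while m > 1: seq = step(seq); m -= 1' loop
def altLoop (m : Int) (seq : List String) : List String :=
  if m > 1 then altLoop (m - 1) (altStep seq) else seq
termination_by m.toNat
decreasing_by omega

def yieldgen_alt (n : Int) : List String := altLoop n ["()"]

-- ===== PRECONDITION & SPEC =====
def Spec_yieldgen (n : Int) (out : List String) : Prop := out = yieldgen_alt n
instance (n : Int) (out : List String) : Decidable (Spec_yieldgen n out) := by unfold Spec_yieldgen; infer_instance

-- ===== CLAIM (what is proved, stated in full; the proofs are below) =====
def Claim_equal_yieldgen : Prop := ∀ (n : Int), Dom_yieldgen n → Spec_yieldgen n (yieldgen n)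

-- ===== LEMMAS AND PROOFS =====

def expandOne (par : String) : List String :=
  let p1 := "()" ++ par
  let p2 := "(" ++ par ++ ")"
  let p3 := par ++ "()"
  [p1, p2] ++ if p1 ≠ p3 then [p3] else []

theorem altStep_eq (s : List String) : altStep s = s.flatMap expandOne := by
  unfold altStep
  have h := PySem.List.foldl_append_eq_flatMap (l := s) (acc := ([] : List String))
    (g := expandOne)
  simpa [expandOne, List.append_assoc] using h

theorem altLoop_step (m : Int) (s : List String) :
    altLoop m (altStep s) = altStep (altLoop m s) := by
  by_cases h : m > 1
  · conv_lhs => rw [altLoop, if_pos h]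
    conv_rhs => rw [altLoop, if_pos h]
    exact altLoop_step (m - 1) (altStep s)
  · conv_lhs => rw [altLoop, if_neg h]
    conv_rhs => rw [altLoop, if_neg h]
termination_by m.toNat
decreasing_by omega

theorem yieldgen_eq (n : Int) : yieldgen n = altLoop n ["()"] := by
  by_cases h : n ≤ 1
  · rw [yieldgen, if_pos h, altLoop, if_neg (by omega)]
  · rw [yieldgen, if_neg h, altLoop, if_pos (by omega),
      yieldgen_eq (n - 1), altLoop_step, altStep_eq]
    rfl
termination_by n.toNat
decreasing_by omega

-- ===== VERDICT (by name: the statement is the Claim_ definition above) =====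
theorem yieldgen_spec : Claim_equal_yieldgen := by
  intro n _
  unfold Spec_yieldgen yieldgen_alt
  exact yieldgen_eq n
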